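-- pv_equiv track=rewrite | github.com/TempeHS/2027SE_PythonFundamentals_Braj.S | 2-Loops/plates/plates.py | numbers_at_end
-- ===== SOURCE A (Python) =====
-- def numbers_at_end(c):
--     seen_digit = False
--
--     for ch in c:
--         if ch.isdigit():
--             seen_digit = True
--         elif seen_digit and ch.isalpha():
--             return False
--
--     return True
-- ===== SOURCE B (Python) =====
-- def numbers_at_end(c):
--     for i, ch in enumerate(c):
--         if ch.isdigit():
--             return not any(x.isalpha() for x in c[i + 1:])
--     return True
-- ===== Notes on version B (the rewrite author's own statement) =====
-- stated objective: simpler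
-- what changed: Replaces the carried seen_digit boolean flag with a locate-then-scan decomposition: find the first digit, then return whether the remaining suffix contains no alphabetic character.
import Mathlib
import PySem

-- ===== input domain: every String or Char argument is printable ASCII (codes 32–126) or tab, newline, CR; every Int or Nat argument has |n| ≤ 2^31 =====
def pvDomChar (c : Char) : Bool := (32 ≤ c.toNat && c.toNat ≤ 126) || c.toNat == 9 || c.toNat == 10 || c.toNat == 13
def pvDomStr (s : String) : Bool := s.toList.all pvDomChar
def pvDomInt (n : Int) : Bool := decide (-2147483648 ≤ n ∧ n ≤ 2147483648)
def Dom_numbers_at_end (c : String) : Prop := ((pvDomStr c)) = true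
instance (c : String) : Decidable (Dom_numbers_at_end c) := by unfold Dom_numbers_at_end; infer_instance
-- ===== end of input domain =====

-- B replaces A's carried seen_digit flag with a locate-then-scan decomposition (same cost, plainer).

-- ===== PORT A =====
-- the loop carrying seen_digit, with the early `return False`
def numbersAtEndLoopA : List Char → Bool → Bool
  | [], _ => true
  | ch :: rest, seen =>
    if PySem.Chars.isdigit ch then numbersAtEndLoopA rest true
    else if seen && PySem.Chars.isalpha ch then false
    else numbersAtEndLoopA rest seen

def numbers_at_end (c : String) : Bool := numbersAtEndLoopA c.toList false

-- ===== PORT B =====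
-- enumerate(c)
def pvEnumFrom : Nat → List Char → List (Nat × Char)
  | _, [] => []
  | i, x :: xs => (i, x) :: pvEnumFrom (i + 1) xs

-- the enumerate loop: at the first digit, return not any(x.isalpha() for x in c[i+1:])
def numbersAtEndLoopB (full : List Char) : List (Nat × Char) → Bool
  | [] => true
  | (i, ch) :: rest =>
    if PySem.Chars.isdigit ch then
      !((PySem.List.slice full (some ((i : Int) + 1)) none).any PySem.Chars.isalpha)
    else numbersAtEndLoopB full rest

def numbers_at_end_alt (c : String) : Bool :=
  numbersAtEndLoopB c.toList (pvEnumFrom 0 c.toList)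

-- ===== PRECONDITION & SPEC =====
def Spec_numbers_at_end (c : String) (out : Bool) : Prop := out = numbers_at_end_alt c
instance (c : String) (out : Bool) : Decidable (Spec_numbers_at_end c out) := by unfold Spec_numbers_at_end; infer_instance

-- ===== CLAIM (what is proved, stated in full; the proofs are below) =====
def Claim_equal_numbers_at_end : Prop := ∀ (c : String), Dom_numbers_at_end c → Spec_numbers_at_end c (numbers_at_end c)

-- ===== LEMMAS AND PROOFS =====

-- no character is both a Python digit and alphabetic
theorem pv_digit_not_alpha (c : Char) (h : PySem.Chars.isdigit c = true) :
    PySem.Chars.isalpha c = false := by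
  simp [PySem.Chars.isdigit, PySem.Chars.isalpha, PySem.Chars.isupper, PySem.Chars.islower,
    Char.le_def, UInt32.le_iff_toNat_le] at *
  omega

-- once seen_digit is set, A's loop just checks that no alphabetic char remains
theorem loopA_seen (l : List Char) :
    numbersAtEndLoopA l true = !(l.any PySem.Chars.isalpha) := by
  induction l with
  | nil => rfl
  | cons ch rest ih =>
    by_cases hd : PySem.Chars.isdigit ch = true
    · simp [numbersAtEndLoopA, hd, ih, pv_digit_not_alpha ch hd]
    · by_cases ha : PySem.Chars.isalpha ch = true
      · simp [numbersAtEndLoopA, hd, ha]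
      · simp [numbersAtEndLoopA, hd, ha, ih]

theorem loop_agree (l : List Char) (k : Nat) (full : List Char) (hk : full.drop k = l) :
    numbersAtEndLoopA l false = numbersAtEndLoopB full (pvEnumFrom k l) := by
  induction l generalizing k with
  | nil => rfl
  | cons ch rest ih =>
    have hrest : full.drop (k + 1) = rest := by
      rw [← List.drop_drop, hk]
      rfl
    by_cases hd : PySem.Chars.isdigit ch = true
    · have hslice : PySem.List.slice full (some ((k : Int) + 1)) none = rest := by
        have : ((k : Int) + 1) = ((k + 1 : Nat) : Int) := by push_cast; ring
        rw [this, PySem.List.slice_from_natCast, hrest]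
      simp [numbersAtEndLoopA, numbersAtEndLoopB, pvEnumFrom, hd, hslice, loopA_seen]
    · simp [numbersAtEndLoopA, numbersAtEndLoopB, pvEnumFrom, hd, ih (k + 1) hrest]

-- ===== VERDICT (by name: the statement is the Claim_ definition above) =====
theorem numbers_at_end_spec : Claim_equal_numbers_at_end := by
  intro c _
  unfold Spec_numbers_at_end numbers_at_end numbers_at_end_alt
  exact loop_agree c.toList 0 c.toList rfl
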